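-- pv_equiv track=rewrite | github.com/sookoothaii/HAK-GAL-Hexagonal | scripts/v6_autopilot.py | fetch_candidates_example
-- ===== SOURCE A (Python) =====
-- from typing import Optional, Dict, Any, List
--
-- def fetch_candidates_example(limit: int) -> List[str]:
-- 	base = [
-- 		"IsA(Socrates, Philosopher).",
-- 		"HasPart(Computer, CPU).",
-- 		"Prevents(ProperNutrition, Deficiencies).",
-- 		"SubfieldOf(Biotechnology, LifeSciences).",
-- 	]
-- 	# Wiederhole bis Limit
-- 	out: List[str] = []
-- 	while len(out) < limit:
-- 		for s in base:
-- 			out.append(s)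
-- 			if len(out) >= limit:
-- 				break
-- 	return out
-- ===== SOURCE B (Python) =====
-- from typing import List
--
-- def fetch_candidates_example(limit: int) -> List[str]:
-- 	base = [
-- 		"IsA(Socrates, Philosopher).",
-- 		"HasPart(Computer, CPU).",
-- 		"Prevents(ProperNutrition, Deficiencies).",
-- 		"SubfieldOf(Biotechnology, LifeSciences).",
-- 	]
-- 	# replicate enough full copies, then truncate
-- 	return (base * (limit // 4 + 1))[:limit]
-- ===== Notes on version B (the rewrite author's own statement) =====
-- stated objective: simpler
-- what changed: Replaces the incremental while/for append-with-break loop by one bulk construction: replicate the base list enough times and slice the result to the requested length.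
import Mathlib
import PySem

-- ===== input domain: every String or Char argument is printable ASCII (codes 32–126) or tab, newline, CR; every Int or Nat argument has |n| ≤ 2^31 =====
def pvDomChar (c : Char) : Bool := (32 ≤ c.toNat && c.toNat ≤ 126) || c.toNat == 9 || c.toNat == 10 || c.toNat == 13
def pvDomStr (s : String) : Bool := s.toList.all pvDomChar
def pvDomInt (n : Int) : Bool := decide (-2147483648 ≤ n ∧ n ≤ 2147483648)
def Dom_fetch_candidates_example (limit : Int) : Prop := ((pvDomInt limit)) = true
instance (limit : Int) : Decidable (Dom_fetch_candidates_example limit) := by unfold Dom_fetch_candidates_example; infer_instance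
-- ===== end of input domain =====

-- B replaces A's while/for append-with-break loop by a bulk replicate-then-truncate construction.

def pvBase : List String :=
  [ "IsA(Socrates, Philosopher)."
  , "HasPart(Computer, CPU)."
  , "Prevents(ProperNutrition, Deficiencies)."
  , "SubfieldOf(Biotechnology, LifeSciences)." ]

-- ===== PORT A =====
-- inner 'for s in base' loop with its break
def pvInnerA (limit : Int) : List String → List String → List String
  | [], out => out
  | s :: rest, out =>
      let out' := out ++ [s]
      if limit ≤ (out'.length : Int) then out' else pvInnerA limit rest out'

theorem pvInnerA_grows (limit : Int) (bs : List String) (out : List String) (h : bs ≠ []) :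
    out.length < (pvInnerA limit bs out).length := by
  induction bs generalizing out with
  | nil => exact absurd rfl h
  | cons s rest ih =>
    simp only [pvInnerA]
    split
    · simp
    · rcases rest with _ | ⟨t, rest'⟩
      · simp [pvInnerA]
      · have := ih (out ++ [s]) (by simp)
        simp at this ⊢; omega

-- outer 'while len(out) < limit' loop
def pvOuterA (limit : Int) (out : List String) : List String :=
  if h : (out.length : Int) < limit then pvOuterA limit (pvInnerA limit pvBase out) else out
termination_by (limit - out.length).toNat
decreasing_by
  have := pvInnerA_grows limit pvBase out (by simp [pvBase])
  omega

def fetch_candidates_example (limit : Int) : List String :=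
  pvOuterA limit []

-- ===== PORT B =====
-- Python list multiply: base * n  (n ≤ 0 gives [])
def pvListMul (xs : List String) (n : Int) : List String :=
  List.flatten (List.replicate n.toNat xs)

def fetch_candidates_example_alt (limit : Int) : List String :=
  PySem.List.slice (pvListMul pvBase (PySem.Int.floordiv limit 4 + 1)) none (some limit)

-- ===== PRECONDITION & SPEC =====
def Spec_fetch_candidates_example (limit : Int) (out : List String) : Prop := out = fetch_candidates_example_alt limit
instance (limit : Int) (out : List String) : Decidable (Spec_fetch_candidates_example limit out) := by unfold Spec_fetch_candidates_example; infer_instance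

-- ===== CLAIM (what is proved, stated in full; the proofs are below) =====
def Claim_equal_fetch_candidates_example : Prop := ∀ (limit : Int), Dom_fetch_candidates_example limit → Spec_fetch_candidates_example limit (fetch_candidates_example limit)

-- ===== LEMMAS AND PROOFS =====

-- canonical form: first n elements of base repeated
def pvCyc (n : Nat) : List String := (List.flatten (List.replicate (n / 4 + 1) pvBase)).take n

theorem pvInnerA_eq (limit : Int) (out : List String)
    (h : (out.length : Int) < limit) :
    pvInnerA limit pvBase out = out ++ pvBase.take (min (limit - out.length).toNat 4) := by
  set m : Int := limit - out.length with hm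
  have hm1 : 1 ≤ m := by omega
  by_cases h4 : 4 ≤ m
  · have : min m.toNat 4 = 4 := by omega
    rw [this]
    simp only [pvBase, pvInnerA, List.take]
    split_ifs with h1 h2 h3 h4'
    all_goals simp_all
    all_goals omega
  · interval_cases m
    · have : min (1 : Int).toNat 4 = 1 := by decide
      rw [this]
      simp only [pvBase, pvInnerA, List.take]
      split_ifs with h1 <;> simp_all <;> omega
    · have : min (2 : Int).toNat 4 = 2 := by decide
      rw [this]
      simp only [pvBase, pvInnerA, List.take]
      split_ifs with h1 h2 <;> simp_all <;> omega
    · have : min (3 : Int).toNat 4 = 3 := by decide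
      rw [this]
      simp only [pvBase, pvInnerA, List.take]
      split_ifs with h1 h2 h3 <;> simp_all <;> omega

-- the chunk appended for m remaining slots
def pvG : Nat → List String
  | 0 => []
  | m + 1 => if m + 1 ≤ 4 then pvBase.take (m + 1) else pvBase ++ pvG (m + 1 - 4)

theorem pvG_small (m : Nat) (h1 : 1 ≤ m) (h4 : m ≤ 4) : pvG m = pvBase.take m := by
  rcases m with _ | m
  · omega
  · rw [pvG, if_pos (by omega)]

theorem pvG_big (m : Nat) (h : 5 ≤ m) : pvG m = pvBase ++ pvG (m - 4) := by
  rcases m with _ | m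
  · omega
  · rw [pvG, if_neg (by omega)]

theorem pvOuterA_eq (limit : Int) (out : List String) :
    pvOuterA limit out = out ++ pvG (limit - out.length).toNat := by
  rw [pvOuterA]
  split_ifs with h
  · have hstep := pvInnerA_eq limit out h
    have hlen : (pvInnerA limit pvBase out).length
        = out.length + min (limit - out.length).toNat 4 := by
      rw [hstep]; simp [pvBase]
    rw [pvOuterA_eq limit (pvInnerA limit pvBase out), hlen, hstep]
    set m : Nat := (limit - out.length).toNat with hmn
    have hm1 : 1 ≤ m := by omega
    by_cases h4 : m ≤ 4
    · have harg : (limit - ((out.length + min m 4 : Nat) : Int)).toNat = 0 := by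
        push_cast; omega
      rw [harg]
      have hmin : min m 4 = m := by omega
      rw [hmin, pvG_small m hm1 h4]
      simp [pvG]
    · have harg : (limit - ((out.length + min m 4 : Nat) : Int)).toNat = m - 4 := by
        push_cast; omega
      rw [harg]
      have hmin : min m 4 = 4 := by omega
      rw [hmin, pvG_big m (by omega)]
      simp [pvBase]
  · have : (limit - out.length : Int).toNat = 0 := by omega
    rw [this]; simp [pvG]
termination_by (limit - out.length).toNat
decreasing_by
  have := pvInnerA_grows limit pvBase out (by simp [pvBase])
  omega

theorem pvG_eq_cyc (n : Nat) : pvG n = pvCyc n := by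
  induction n using Nat.strong_induction_on with
  | _ n ih =>
    rcases n with _ | m
    · simp [pvG, pvCyc]
    · by_cases h4 : m + 1 ≤ 4
      · rw [pvG_small (m + 1) (by omega) h4]
        unfold pvCyc
        have hle : m ≤ 3 := by omega
        interval_cases m <;> simp [pvBase]
      · rw [pvG_big (m + 1) (by omega), ih (m + 1 - 4) (by omega)]
        have hb : pvBase.length = 4 := by simp [pvBase]
        conv_rhs =>
          unfold pvCyc
          rw [show (m + 1) / 4 + 1 = ((m + 1 - 4) / 4 + 1) + 1 from by omega,
              List.replicate_succ, List.flatten_cons, List.take_append, hb,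
              List.take_of_length_le (show pvBase.length ≤ m + 1 by rw [hb]; omega)]
        simp [pvCyc]

-- B unfolds to the canonical form for nonnegative limit
theorem alt_eq_cyc (limit : Int) (h : 0 ≤ limit) :
    fetch_candidates_example_alt limit = pvCyc limit.toNat := by
  unfold fetch_candidates_example_alt pvListMul pvCyc
  obtain ⟨n, rfl⟩ : ∃ n : Nat, limit = (n : Int) := ⟨limit.toNat, by omega⟩
  rw [PySem.List.slice_to_natCast]
  have h4 : ((4 : Int)) = ((4 : Nat) : Int) := by norm_num
  have hf : (PySem.Int.floordiv (n : Int) 4 + 1).toNat = n / 4 + 1 := by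
    rw [h4, PySem.Int.floordiv_natCast]; omega
  rw [hf]
  simp

theorem alt_neg (limit : Int) (h : limit < 0) :
    fetch_candidates_example_alt limit = [] := by
  unfold fetch_candidates_example_alt pvListMul
  have hd : PySem.Int.floordiv limit 4 = limit / 4 :=
    PySem.Int.floordiv_eq_ediv_of_pos (by norm_num)
  have : (PySem.Int.floordiv limit 4 + 1).toNat = 0 := by rw [hd]; omega
  rw [this]
  simp [PySem.List.slice]

-- ===== VERDICT (by name: the statement is the Claim_ definition above) =====
theorem fetch_candidates_example_spec : Claim_equal_fetch_candidates_example := by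
  intro limit _
  unfold Spec_fetch_candidates_example fetch_candidates_example
  by_cases h : limit < 0
  · rw [alt_neg limit h, pvOuterA]
    rw [dif_neg (by simp; omega)]
  · rw [alt_eq_cyc limit (by omega), pvOuterA_eq]
    simp [pvG_eq_cyc]
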